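-- pv_equiv track=rewrite | github.com/mrthomasvan-eng/multibox-planner | app/recommender.py | _charm_synergy_bonus
-- ===== SOURCE A (Python) =====
-- from typing import Dict, List, Optional, Tuple, Set, Any
--
-- def _charm_synergy_bonus(comp: List[str]) -> int:
--     """When Enchanter is charm-tanking, caster and caster-pet classes get a synergy bonus (no melee when charm pet tanks).
--     Magician/Necromancer: high; Beastlord: some; Wizard/Druid (casters): bonus."""
--     if "Enchanter" not in comp:
--         return 0
--     bonus = 0
--     for c in comp:
--         if c == "Enchanter":
--             continue
--         if c in {"Magician", "Necromancer"}:
--             bonus += 14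
--         elif c == "Beastlord":
--             bonus += 6
--         elif c in {"Wizard", "Druid"}:
--             bonus += 8
--     return bonus
-- ===== SOURCE B (Python) =====
-- from collections import Counter
-- from typing import List
--
-- def _charm_synergy_bonus(comp: List[str]) -> int:
--     if "Enchanter" not in comp:
--         return 0
--     cnt = Counter(comp)
--     return (14 * (cnt["Magician"] + cnt["Necromancer"])
--             + 6 * cnt["Beastlord"]
--             + 8 * (cnt["Wizard"] + cnt["Druid"]))
-- ===== Notes on version B (the rewrite author's own statement) =====
-- stated objective: simpler
-- what changed: Replaces the per-element branch-and-accumulate loop with a count-then-combine formulation: build a Counter of class occurrences once and return one fixed weighted combination over the five known class keys.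
import Mathlib
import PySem

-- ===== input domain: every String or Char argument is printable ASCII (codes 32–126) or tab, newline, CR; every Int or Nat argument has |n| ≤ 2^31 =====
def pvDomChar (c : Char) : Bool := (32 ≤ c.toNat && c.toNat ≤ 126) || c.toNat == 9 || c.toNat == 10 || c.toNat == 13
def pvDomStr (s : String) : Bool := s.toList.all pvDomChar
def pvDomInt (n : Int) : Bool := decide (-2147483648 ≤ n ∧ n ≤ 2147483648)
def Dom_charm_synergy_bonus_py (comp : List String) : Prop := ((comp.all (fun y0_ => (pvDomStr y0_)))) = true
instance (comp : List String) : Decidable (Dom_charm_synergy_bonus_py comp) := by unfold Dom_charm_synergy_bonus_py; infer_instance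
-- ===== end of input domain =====

-- B replaces the per-element branch-and-accumulate loop with a count-then-combine
-- formulation (Counter once, then one fixed weighted sum); objective: simpler.

-- ===== PORT A =====
def charm_synergy_bonus_py (comp : List String) : Int :=
  if "Enchanter" ∈ comp then
    comp.foldl (fun bonus c =>
      if c = "Enchanter" then bonus
      else if c = "Magician" ∨ c = "Necromancer" then bonus + 14
      else if c = "Beastlord" then bonus + 6
      else if c = "Wizard" ∨ c = "Druid" then bonus + 8
      else bonus) 0
  else 0

-- ===== PORT B =====
def charm_synergy_bonus_py_alt (comp : List String) : Int :=
  if "Enchanter" ∈ comp then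
    14 * ((PySem.List.count comp "Magician" : Int) + (PySem.List.count comp "Necromancer" : Int))
      + 6 * (PySem.List.count comp "Beastlord" : Int)
      + 8 * ((PySem.List.count comp "Wizard" : Int) + (PySem.List.count comp "Druid" : Int))
  else 0

-- ===== PRECONDITION & SPEC =====
def Spec_charm_synergy_bonus_py (comp : List String) (out : Int) : Prop := out = charm_synergy_bonus_py_alt comp
instance (comp : List String) (out : Int) : Decidable (Spec_charm_synergy_bonus_py comp out) := by unfold Spec_charm_synergy_bonus_py; infer_instance

-- ===== CLAIM (what is proved, stated in full; the proofs are below) =====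
def Claim_equal_charm_synergy_bonus_py : Prop := ∀ (comp : List String), Dom_charm_synergy_bonus_py comp → Spec_charm_synergy_bonus_py comp (charm_synergy_bonus_py comp)

-- ===== LEMMAS AND PROOFS =====
lemma charm_fold_counts (comp : List String) (b : Int) :
    comp.foldl (fun bonus c =>
      if c = "Enchanter" then bonus
      else if c = "Magician" ∨ c = "Necromancer" then bonus + 14
      else if c = "Beastlord" then bonus + 6
      else if c = "Wizard" ∨ c = "Druid" then bonus + 8
      else bonus) b
    = b + 14 * ((PySem.List.count comp "Magician" : Int) + (PySem.List.count comp "Necromancer" : Int))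
        + 6 * (PySem.List.count comp "Beastlord" : Int)
        + 8 * ((PySem.List.count comp "Wizard" : Int) + (PySem.List.count comp "Druid" : Int)) := by
  induction comp generalizing b with
  | nil => simp [PySem.List.count]
  | cons x xs ih =>
    rw [List.foldl_cons, ih]
    by_cases hE : x = "Enchanter"
    · subst hE; simp [PySem.List.count]
    · by_cases hM : x = "Magician"
      · subst hM; simp [PySem.List.count]; ring
      · by_cases hN : x = "Necromancer"
        · subst hN; simp [PySem.List.count]; ring
        · by_cases hB : x = "Beastlord"
          · subst hB; simp [PySem.List.count]; ring
          · by_cases hW : x = "Wizard"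
            · subst hW; simp [PySem.List.count]; ring
            · by_cases hD : x = "Druid"
              · subst hD; simp [PySem.List.count]; ring
              · simp [PySem.List.count, hE, hM, hN, hB, hW, hD]

-- ===== VERDICT (by name: the statement is the Claim_ definition above) =====
theorem charm_synergy_bonus_py_spec : Claim_equal_charm_synergy_bonus_py := by
  intro comp _
  unfold Spec_charm_synergy_bonus_py charm_synergy_bonus_py charm_synergy_bonus_py_alt
  by_cases h : "Enchanter" ∈ comp <;> simp [h, charm_fold_counts]
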